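-- pv_equiv track=rewrite | github.com/Olle7/uldistatud-tehtem-rgi-funktsioon | aTXb/aTXb III.py | leia_avaldisest_a_b_X
-- ===== SOURCE A (Python) =====
-- def leia_avaldisest_a_b_X(avaldis):
--     k=0
--     a=""
--     b=""
--     X=""
--     for mark in(list(avaldis)):
--         if mark.isdigit() is False and mark != "." :#kui mõni märk pole number või "." siis k +=1
--             k+=1
--         elif k==0:#kui k==0 siis numbrid või "." tähendavad a´d
--             a+=mark
--         elif k==2:#kui k==2 siis numbrid või "." tähendavad X´i
--             X+=mark
--         elif k==3:#kui k==3 siis numbrid või "." tähendavad b´d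
--             b+=mark
--     return(a,X,b)
-- ===== SOURCE B (Python) =====
-- def leia_avaldisest_a_b_X(avaldis):
--     # Locate all separator positions once, then slice the three fields
--     # directly out of the string by index arithmetic.
--     seps = [i for i, ch in enumerate(avaldis) if not (ch.isdigit() or ch == ".")]
--     L = len(avaldis)
--     seps = seps + [L, L, L, L]
--     a = avaldis[0:seps[0]]
--     X = avaldis[seps[1] + 1:seps[2]]
--     b = avaldis[seps[2] + 1:seps[3]]
--     return (a, X, b)
-- ===== Notes on version B (the rewrite author's own statement) =====
-- stated objective: alternative
-- what changed: B first computes the list of separator positions (indices of non-digit/non-dot characters) and then extracts a, X, b as three direct string slices between the 0th/1st/2nd/3rd separator positions (padded with len), instead of routing every character through branches keyed on a running separator counter.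
import Mathlib
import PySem

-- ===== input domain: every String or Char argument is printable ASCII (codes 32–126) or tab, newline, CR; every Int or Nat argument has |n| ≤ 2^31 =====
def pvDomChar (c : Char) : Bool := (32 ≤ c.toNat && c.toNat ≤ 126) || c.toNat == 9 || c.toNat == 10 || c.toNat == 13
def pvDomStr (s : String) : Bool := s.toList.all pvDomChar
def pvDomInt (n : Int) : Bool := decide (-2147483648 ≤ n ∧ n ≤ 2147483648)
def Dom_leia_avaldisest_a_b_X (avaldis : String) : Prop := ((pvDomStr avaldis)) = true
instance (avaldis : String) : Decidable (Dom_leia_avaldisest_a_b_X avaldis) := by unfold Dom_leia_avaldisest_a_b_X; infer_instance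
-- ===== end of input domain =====

-- B computes the list of separator positions once and slices the three fields out of the
-- string by index arithmetic, instead of a counter-keyed branch per character (alternative).

-- ===== PORT A =====
-- state: (k, a, b, X), in the order the Python assigns them
def pvStepA (s : Nat × List Char × List Char × List Char) (mark : Char) :
    Nat × List Char × List Char × List Char :=
  if PySem.Chars.isdigit mark = false ∧ mark ≠ '.' then
    (s.1 + 1, s.2.1, s.2.2.1, s.2.2.2)
  else if s.1 = 0 then
    (s.1, s.2.1 ++ [mark], s.2.2.1, s.2.2.2)
  else if s.1 = 2 then
    (s.1, s.2.1, s.2.2.1, s.2.2.2 ++ [mark])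
  else if s.1 = 3 then
    (s.1, s.2.1, s.2.2.1 ++ [mark], s.2.2.2)
  else s

def leia_avaldisest_a_b_X (avaldis : String) : String × String × String :=
  let st := avaldis.toList.foldl pvStepA (0, [], [], [])
  (String.ofList st.2.1, String.ofList st.2.2.2, String.ofList st.2.2.1)

-- ===== PORT B =====
-- the comprehension [i for i, ch in enumerate(avaldis) if not (ch.isdigit() or ch == ".")]
def pvSeps (cs : List Char) : List Int :=
  (PySem.List.enumerate cs).filterMap
    (fun p => if !(PySem.Chars.isdigit p.2 || p.2 == '.') then some p.1 else none)

def leia_avaldisest_a_b_X_alt (avaldis : String) : String × String × String :=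
  let cs := avaldis.toList
  let L : Int := PySem.Chars.len cs
  let seps := pvSeps cs ++ [L, L, L, L]
  let a := PySem.Chars.slice cs (some 0) (some (seps.getD 0 0))
  let X := PySem.Chars.slice cs (some (seps.getD 1 0 + 1)) (some (seps.getD 2 0))
  let b := PySem.Chars.slice cs (some (seps.getD 2 0 + 1)) (some (seps.getD 3 0))
  (String.ofList a, String.ofList X, String.ofList b)

-- ===== PRECONDITION & SPEC =====
def Spec_leia_avaldisest_a_b_X (avaldis : String) (out : String × String × String) : Prop := out = leia_avaldisest_a_b_X_alt avaldis
instance (avaldis : String) (out : String × String × String) : Decidable (Spec_leia_avaldisest_a_b_X avaldis out) := by unfold Spec_leia_avaldisest_a_b_X; infer_instance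

-- ===== CLAIM (what is proved, stated in full; the proofs are below) =====
def Claim_equal_leia_avaldisest_a_b_X : Prop := ∀ (avaldis : String), Dom_leia_avaldisest_a_b_X avaldis → Spec_leia_avaldisest_a_b_X avaldis (leia_avaldisest_a_b_X avaldis)

-- ===== LEMMAS AND PROOFS =====

-- start index of segment i, given the separator positions P of a string of length L
def pvStart (P : List Int) (L : Int) (i : Nat) : Int :=
  if i = 0 then 0 else P.getD (i - 1) L + 1

-- segment i of cs (the maximal digit/dot run between separators number i-1 and i)
def pvSeg (cs : List Char) (i : Nat) : List Char :=
  PySem.List.slice cs (some (pvStart (pvSeps cs) (cs.length : Int) i))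
    (some ((pvSeps cs).getD i (cs.length : Int)))

theorem pvGetD_in (P : List Int) (i : Nat) (h : i < P.length) (d : Int) :
    P.getD i d = P[i] := List.getD_eq_getElem P d h

theorem pvGetD_out (P : List Int) (i : Nat) (h : P.length ≤ i) (d : Int) :
    P.getD i d = d := by
  rw [List.getD_eq_getElem?_getD, List.getElem?_eq_none h]
  rfl

theorem pvGetD_app_in (P Q : List Int) (i : Nat) (h : i < P.length) (d : Int) :
    (P ++ Q).getD i d = P[i] := by
  rw [List.getD_append _ _ _ _ h]
  exact pvGetD_in P i h d

theorem pvGetD_app_self (P : List Int) (x d : Int) :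
    (P ++ [x]).getD P.length d = x := by
  simp [List.getD_eq_getElem?_getD]

theorem pvGetD_app_out (P : List Int) (x d : Int) (i : Nat) (h : P.length + 1 ≤ i) :
    (P ++ [x]).getD i d = d := pvGetD_out _ i (by simp; omega) d

theorem pvSeps_snoc (cs : List Char) (c : Char) :
    pvSeps (cs ++ [c]) =
      pvSeps cs ++
        (if PySem.Chars.isdigit c = false ∧ c ≠ '.' then [(cs.length : Int)] else []) := by
  unfold pvSeps
  rw [PySem.List.enumerate_append, List.filterMap_append]
  congr 1
  simp only [PySem.List.enumerate_cons, PySem.List.enumerate_nil, List.filterMap]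
  by_cases h1 : PySem.Chars.isdigit c = true
  · simp [h1]
  · by_cases h2 : c = '.' <;> simp [h1, h2]

theorem pvSeps_bounds (cs : List Char) :
    ∀ x ∈ pvSeps cs, 0 ≤ x ∧ x < (cs.length : Int) := by
  intro x hx
  unfold pvSeps at hx
  rcases List.mem_filterMap.mp hx with ⟨p, hp, hf⟩
  rcases (PySem.List.mem_enumerate_iff cs 0 p).mp hp with ⟨k, hk, rfl⟩
  by_cases h : !(PySem.Chars.isdigit (cs[k]) || (cs[k]) == '.')
  · simp [h] at hf
    omega
  · simp [h] at hf

theorem pvSliceStable (cs : List Char) (c : Char) (s e : Int)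
    (hs : 0 ≤ s) (he : 0 ≤ e) (hel : e ≤ (cs.length : Int)) :
    PySem.List.slice (cs ++ [c]) (some s) (some e) = PySem.List.slice cs (some s) (some e) := by
  rw [PySem.List.slice_toNat _ hs he, PySem.List.slice_toNat _ hs he]
  by_cases h : s.toNat ≤ cs.length
  · rw [List.drop_append_of_le_length h, List.take_append_of_le_length (by simp; omega)]
  · rw [Nat.sub_eq_zero_of_le (by omega)]
    simp

theorem pvSliceSnocEnd (cs : List Char) (c : Char) (s : Int)
    (h0 : 0 ≤ s) (h1 : s ≤ (cs.length : Int)) :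
    PySem.List.slice (cs ++ [c]) (some s) (some ((cs.length : Int) + 1)) =
      PySem.List.slice cs (some s) (some (cs.length : Int)) ++ [c] := by
  rw [PySem.List.slice_toNat _ h0 (by omega), PySem.List.slice_toNat _ h0 (by omega)]
  have hd : (cs ++ [c]).drop s.toNat = cs.drop s.toNat ++ [c] :=
    List.drop_append_of_le_length (by omega)
  have t1 : List.take (((cs.length : Int) + 1).toNat - s.toNat) (cs.drop s.toNat ++ [c])
      = cs.drop s.toNat ++ [c] := List.take_of_length_le (by simp; omega)
  have t2 : List.take ((cs.length : Int).toNat - s.toNat) (cs.drop s.toNat)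
      = cs.drop s.toNat := List.take_of_length_le (by simp)
  rw [hd, t1, t2]

theorem pvSliceEmpty (cs : List Char) (s e : Int) (he : 0 ≤ e) (h : e ≤ s) :
    PySem.List.slice cs (some s) (some e) = [] := by
  rw [PySem.List.slice_toNat _ (le_trans he h) he, Nat.sub_eq_zero_of_le (by omega)]
  simp

-- getD through the four-element L padding, for indices below 4
theorem pvPadGetD (P : List Int) (L : Int) (i : Nat) (hi : i < 4) (d : Int) :
    (P ++ [L, L, L, L]).getD i d = P.getD i L := by
  simp only [List.getD_eq_getElem?_getD, List.getElem?_append]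
  by_cases h : i < P.length
  · simp [h]
  · have hP : P[i]? = none := List.getElem?_eq_none (by omega)
    rcases (by omega : i - P.length = 0 ∨ i - P.length = 1 ∨ i - P.length = 2 ∨ i - P.length = 3)
      with h0 | h0 | h0 | h0 <;> simp [h, h0]

-- snoc of a separator character leaves every segment unchanged
theorem pvSeg_snoc_sep (cs : List Char) (c : Char)
    (hc : PySem.Chars.isdigit c = false ∧ c ≠ '.') (i : Nat) :
    pvSeg (cs ++ [c]) i = pvSeg cs i := by
  have hb := pvSeps_bounds cs
  unfold pvSeg pvStart
  rw [pvSeps_snoc cs c, if_pos hc]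
  have hlen : (((cs ++ [c]).length : Nat) : Int) = (cs.length : Int) + 1 := by simp
  rw [hlen]
  set P := pvSeps cs with hP
  set L : Int := (cs.length : Int) with hL
  rcases Nat.lt_or_ge i P.length with hik | hik
  · -- i < |P|: both stops are P[i] < L
    have hstop : (P ++ [L]).getD i (L + 1) = P[i] := pvGetD_app_in P [L] i hik _
    have hstop' : P.getD i L = P[i] := pvGetD_in P i hik _
    have hm := hb P[i] (List.getElem_mem hik)
    rw [hstop, hstop']
    by_cases hi0 : i = 0
    · rw [if_pos hi0, if_pos hi0]
      exact pvSliceStable cs c 0 P[i] le_rfl hm.1 (le_of_lt hm.2)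
    · rw [if_neg hi0, if_neg hi0]
      have hs1 : (P ++ [L]).getD (i - 1) (L + 1) = P[i - 1] := pvGetD_app_in P [L] (i - 1) (by omega) _
      have hs2 : P.getD (i - 1) L = P[i - 1] := pvGetD_in P (i - 1) (by omega) _
      have hm2 := hb P[i - 1] (List.getElem_mem (by omega))
      rw [hs1, hs2]
      exact pvSliceStable cs c _ _ (by omega) hm.1 (le_of_lt hm.2)
  · rcases Nat.eq_or_lt_of_le hik with heq | hlt
    · -- i = |P|: old stop defaults to L, new stop is the appended L
      subst heq
      have hstop : (P ++ [L]).getD P.length (L + 1) = L := pvGetD_app_self P L _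
      have hstop' : P.getD P.length L = L := pvGetD_out P P.length le_rfl _
      rw [hstop, hstop']
      by_cases hi0 : P.length = 0
      · rw [if_pos hi0, if_pos hi0]
        exact pvSliceStable cs c 0 L le_rfl (by omega) le_rfl
      · rw [if_neg hi0, if_neg hi0]
        have hs1 : (P ++ [L]).getD (P.length - 1) (L + 1) = P[P.length - 1] :=
          pvGetD_app_in P [L] (P.length - 1) (by omega) _
        have hs2 : P.getD (P.length - 1) L = P[P.length - 1] :=
          pvGetD_in P (P.length - 1) (by omega) _
        have hm2 := hb P[P.length - 1] (List.getElem_mem (by omega))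
        rw [hs1, hs2]
        exact pvSliceStable cs c _ _ (by omega) (by omega) le_rfl
    · -- i > |P|: both sides empty
      have hi0 : ¬ i = 0 := by omega
      rw [if_neg hi0, if_neg hi0]
      have hstop : (P ++ [L]).getD i (L + 1) = L + 1 := pvGetD_app_out P L _ i (by omega)
      have hstop' : P.getD i L = L := pvGetD_out P i (by omega) _
      have hold : P.getD (i - 1) L = L := pvGetD_out P (i - 1) (by omega) _
      have hnew : L + 1 ≤ (P ++ [L]).getD (i - 1) (L + 1) + 1 := by
        rcases Nat.eq_or_lt_of_le (show P.length ≤ i - 1 by omega) with he | he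
        · rw [← he, pvGetD_app_self P L _]
        · rw [pvGetD_app_out P L _ (i - 1) (by omega)]
          omega
      rw [hstop, hstop', hold,
        pvSliceEmpty (cs ++ [c]) _ (L + 1) (by omega) (by omega),
        pvSliceEmpty cs (L + 1) L (by omega) (by omega)]

-- snoc of a digit/dot character: segments other than the current one are unchanged
theorem pvSeg_snoc_nonsep_ne (cs : List Char) (c : Char)
    (hc : ¬ (PySem.Chars.isdigit c = false ∧ c ≠ '.')) (i : Nat)
    (hne : i ≠ (pvSeps cs).length) :
    pvSeg (cs ++ [c]) i = pvSeg cs i := by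
  have hb := pvSeps_bounds cs
  unfold pvSeg pvStart
  rw [pvSeps_snoc cs c, if_neg hc, List.append_nil]
  have hlen : (((cs ++ [c]).length : Nat) : Int) = (cs.length : Int) + 1 := by simp
  rw [hlen]
  set P := pvSeps cs with hP
  set L : Int := (cs.length : Int) with hL
  rcases Nat.lt_or_ge i P.length with hik | hik
  · have hstop : P.getD i (L + 1) = P[i] := pvGetD_in P i hik _
    have hstop' : P.getD i L = P[i] := pvGetD_in P i hik _
    have hm := hb P[i] (List.getElem_mem hik)
    rw [hstop, hstop']
    by_cases hi0 : i = 0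
    · rw [if_pos hi0, if_pos hi0]
      exact pvSliceStable cs c 0 P[i] le_rfl hm.1 (le_of_lt hm.2)
    · rw [if_neg hi0, if_neg hi0]
      have hs1 : P.getD (i - 1) (L + 1) = P[i - 1] := pvGetD_in P (i - 1) (by omega) _
      have hs2 : P.getD (i - 1) L = P[i - 1] := pvGetD_in P (i - 1) (by omega) _
      rw [hs1, hs2]
      have hm2 := hb P[i - 1] (List.getElem_mem (by omega))
      exact pvSliceStable cs c _ _ (by omega) hm.1 (le_of_lt hm.2)
  · -- i > |P| (i = |P| is excluded): both sides empty
    have hlt : P.length < i := by omega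
    have hi0 : ¬ i = 0 := by omega
    rw [if_neg hi0, if_neg hi0]
    have hstop : P.getD i (L + 1) = L + 1 := pvGetD_out P i (by omega) _
    have hstop' : P.getD i L = L := pvGetD_out P i (by omega) _
    have hold : P.getD (i - 1) L = L := pvGetD_out P (i - 1) (by omega) _
    have hnew : P.getD (i - 1) (L + 1) = L + 1 := pvGetD_out P (i - 1) (by omega) _
    rw [hstop, hstop', hold, hnew,
      pvSliceEmpty (cs ++ [c]) (L + 1 + 1) (L + 1) (by omega) (by omega),
      pvSliceEmpty cs (L + 1) L (by omega) (by omega)]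

-- snoc of a digit/dot character extends the current (last) segment
theorem pvSeg_snoc_nonsep_eq (cs : List Char) (c : Char)
    (hc : ¬ (PySem.Chars.isdigit c = false ∧ c ≠ '.')) :
    pvSeg (cs ++ [c]) (pvSeps cs).length = pvSeg cs (pvSeps cs).length ++ [c] := by
  have hb := pvSeps_bounds cs
  unfold pvSeg pvStart
  rw [pvSeps_snoc cs c, if_neg hc, List.append_nil]
  have hlen : (((cs ++ [c]).length : Nat) : Int) = (cs.length : Int) + 1 := by simp
  rw [hlen]
  set P := pvSeps cs with hP
  set L : Int := (cs.length : Int) with hL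
  have hstop : P.getD P.length (L + 1) = L + 1 := pvGetD_out P P.length le_rfl _
  have hstop' : P.getD P.length L = L := pvGetD_out P P.length le_rfl _
  rw [hstop, hstop']
  by_cases hi0 : P.length = 0
  · rw [if_pos hi0, if_pos hi0]
    exact pvSliceSnocEnd cs c 0 le_rfl (by omega)
  · rw [if_neg hi0, if_neg hi0]
    have hs1 : P.getD (P.length - 1) (L + 1) = P[P.length - 1] :=
      pvGetD_in P (P.length - 1) (by omega) _
    have hs2 : P.getD (P.length - 1) L = P[P.length - 1] :=
      pvGetD_in P (P.length - 1) (by omega) _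
    have hm2 := hb P[P.length - 1] (List.getElem_mem (by omega))
    rw [hs1, hs2]
    exact pvSliceSnocEnd cs c _ (by omega) (by omega)

-- main loop invariant: A's fold state is (number of separators, segment 0, segment 3, segment 2)
theorem pvInv (cs : List Char) :
    cs.foldl pvStepA (0, [], [], []) =
      ((pvSeps cs).length, pvSeg cs 0, pvSeg cs 3, pvSeg cs 2) := by
  induction cs using List.reverseRecOn with
  | nil => rfl
  | append_singleton cs c ih =>
    rw [List.foldl_append, ih]
    by_cases hc : PySem.Chars.isdigit c = false ∧ c ≠ '.'
    · have hlen : (pvSeps (cs ++ [c])).length = (pvSeps cs).length + 1 := by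
        rw [pvSeps_snoc cs c, if_pos hc]; simp
      simp only [List.foldl_cons, List.foldl_nil, pvStepA, if_pos hc]
      rw [hlen, pvSeg_snoc_sep cs c hc 0, pvSeg_snoc_sep cs c hc 3, pvSeg_snoc_sep cs c hc 2]
    · have hlen : (pvSeps (cs ++ [c])).length = (pvSeps cs).length := by
        rw [pvSeps_snoc cs c, if_neg hc]; simp
      by_cases h0 : (pvSeps cs).length = 0
      · have heq := pvSeg_snoc_nonsep_eq cs c hc
        rw [h0] at heq
        have hn3 := pvSeg_snoc_nonsep_ne cs c hc 3 (by omega)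
        have hn2 := pvSeg_snoc_nonsep_ne cs c hc 2 (by omega)
        simp [pvStepA, if_neg hc, hlen, h0, heq, hn3, hn2]
      · by_cases h2 : (pvSeps cs).length = 2
        · have heq := pvSeg_snoc_nonsep_eq cs c hc
          rw [h2] at heq
          have hn0 := pvSeg_snoc_nonsep_ne cs c hc 0 (by omega)
          have hn3 := pvSeg_snoc_nonsep_ne cs c hc 3 (by omega)
          simp [pvStepA, if_neg hc, hlen, h2, heq, hn0, hn3]
        · by_cases h3 : (pvSeps cs).length = 3
          · have heq := pvSeg_snoc_nonsep_eq cs c hc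
            rw [h3] at heq
            have hn0 := pvSeg_snoc_nonsep_ne cs c hc 0 (by omega)
            have hn2 := pvSeg_snoc_nonsep_ne cs c hc 2 (by omega)
            simp [pvStepA, if_neg hc, hlen, h3, heq, hn0, hn2]
          · have hn0 := pvSeg_snoc_nonsep_ne cs c hc 0 (by omega)
            have hn3 := pvSeg_snoc_nonsep_ne cs c hc 3 (by omega)
            have hn2 := pvSeg_snoc_nonsep_ne cs c hc 2 (by omega)
            have h0' : ¬ pvSeps cs = [] := fun h => h0 (by simp [h])
            simp [pvStepA, if_neg hc, if_neg h2, if_neg h3, hlen, hn0, hn3, hn2, h0']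

-- ===== VERDICT (by name: the statement is the Claim_ definition above) =====
theorem leia_avaldisest_a_b_X_spec : Claim_equal_leia_avaldisest_a_b_X := by
  intro avaldis _
  unfold Spec_leia_avaldisest_a_b_X leia_avaldisest_a_b_X leia_avaldisest_a_b_X_alt
  simp only [pvInv, PySem.Chars.slice_eq_listSlice, PySem.Chars.len_eq]
  rw [pvPadGetD (pvSeps avaldis.toList) (avaldis.toList.length : Int) 0 (by omega) 0,
      pvPadGetD (pvSeps avaldis.toList) (avaldis.toList.length : Int) 1 (by omega) 0,
      pvPadGetD (pvSeps avaldis.toList) (avaldis.toList.length : Int) 2 (by omega) 0,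
      pvPadGetD (pvSeps avaldis.toList) (avaldis.toList.length : Int) 3 (by omega) 0]
  unfold pvSeg pvStart
  norm_num
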